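-- pv_equiv track=rewrite | github.com/StevenL2017/LeetCode | python_template/stack.py | max_range
-- ===== SOURCE A (Python) =====
-- def max_range(nums):
--     n = len(nums)
--     stack = []
--     left, right = [-1] * n, [n] * n
--     for i in range(n):
--         while stack and nums[i] >= nums[stack[-1]]:
--             right[stack.pop()] = i
--         if stack:
--             left[i] = stack[-1]
--         stack.append(i)
--     return left, right
-- ===== SOURCE B (Python) =====
-- def max_range(nums):
--     # Direct per-element scans: nearest strictly-greater on the left,
--     # nearest greater-or-equal on the right (no stack).
--     n = len(nums)
--     left, right = [], []
--     for i in range(n):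
--         l = -1
--         for j in reversed(range(i)):
--             if nums[j] > nums[i]:
--                 l = j
--                 break
--         left.append(l)
--         r = n
--         for j in range(i + 1, n):
--             if nums[j] >= nums[i]:
--                 r = j
--                 break
--         right.append(r)
--     return left, right
-- ===== Notes on version B (the rewrite author's own statement) =====
-- stated objective: alternative
-- what changed: Replaced the one-pass monotonic-stack computation of both boundary arrays by direct per-element scans (nearest strictly-greater index to the left, nearest greater-or-equal index to the right), with no stack and no array mutation.
import Mathlib
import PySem

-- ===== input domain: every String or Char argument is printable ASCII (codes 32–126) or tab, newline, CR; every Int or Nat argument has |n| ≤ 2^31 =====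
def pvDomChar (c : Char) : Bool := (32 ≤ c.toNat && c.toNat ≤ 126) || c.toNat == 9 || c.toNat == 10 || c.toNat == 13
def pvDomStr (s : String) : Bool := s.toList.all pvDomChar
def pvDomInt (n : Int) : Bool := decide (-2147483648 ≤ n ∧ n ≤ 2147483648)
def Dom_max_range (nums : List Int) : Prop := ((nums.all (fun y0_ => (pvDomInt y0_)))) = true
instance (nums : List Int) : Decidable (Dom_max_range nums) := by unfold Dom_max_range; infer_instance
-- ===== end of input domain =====

-- B replaces A's one-pass monotonic stack by direct per-element scans (nearest
-- strictly-greater index to the left, nearest ≥ index to the right); objective: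
-- alternative (not faster).

-- shared transliteration of the Python index access nums[j] (always in range here)
def pvV (nums : List Int) (j : Nat) : Int := nums.getD j 0

-- ===== PORT A =====
-- the inner `while stack and nums[i] >= nums[stack[-1]]: right[stack.pop()] = i`
-- (stack is head-first: head = Python stack[-1])
def pvAPop (nums : List Int) (i : Nat) : List Nat → List Int → List Nat × List Int
  | [], right => ([], right)
  | t :: rest, right =>
    if pvV nums t ≤ pvV nums i then
      pvAPop nums i rest (right.set t (i : Int))
    else (t :: rest, right)

-- one iteration of A's `for i in range(n)` loop; state = (stack, left, right)
def pvAStep (nums : List Int) (s : List Nat × List Int × List Int) (i : Nat) :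
    List Nat × List Int × List Int :=
  let pr := pvAPop nums i s.1 s.2.2
  let left' := match pr.1 with
    | [] => s.2.1
    | t :: _ => s.2.1.set i (t : Int)
  (i :: pr.1, left', pr.2)

def max_range (nums : List Int) : List Int × List Int :=
  let n := nums.length
  let s := (List.range n).foldl (pvAStep nums)
    ([], List.replicate n (-1), List.replicate n (n : Int))
  (s.2.1, s.2.2)

-- ===== PORT B =====
-- `for j in reversed(range(i)): if nums[j] > nums[i]: l = j; break` (else l = -1)
def pvLeftAt (nums : List Int) (i : Nat) : Int :=
  match (List.range i).reverse.find? (fun j => decide (pvV nums i < pvV nums j)) with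
  | some j => (j : Int)
  | none => -1

-- `for j in range(i+1, n): if nums[j] >= nums[i]: r = j; break` (else r = n)
def pvRightAt (nums : List Int) (i : Nat) : Int :=
  match (List.range' (i+1) (nums.length - (i+1))).find? (fun j => decide (pvV nums i ≤ pvV nums j)) with
  | some j => (j : Int)
  | none => (nums.length : Int)

def max_range_alt (nums : List Int) : List Int × List Int :=
  (List.range nums.length).foldl
    (fun lr i => (lr.1 ++ [pvLeftAt nums i], lr.2 ++ [pvRightAt nums i])) ([], [])

-- ===== PRECONDITION & SPEC =====
def Spec_max_range (nums : List Int) (out : List Int × List Int) : Prop := out = max_range_alt nums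
instance (nums : List Int) (out : List Int × List Int) : Decidable (Spec_max_range nums out) := by unfold Spec_max_range; infer_instance

-- ===== CLAIM (what is proved, stated in full; the proofs are below) =====
def Claim_equal_max_range : Prop := ∀ (nums : List Int), Dom_max_range nums → Spec_max_range nums (max_range nums)

-- ===== LEMMAS AND PROOFS =====

theorem pvFoldl_pair_append (f g : Nat → Int) (l : List Nat) (a b : List Int) :
    l.foldl (fun lr i => (lr.1 ++ [f i], lr.2 ++ [g i])) (a, b) =
      (a ++ l.map f, b ++ l.map g) := by
  induction l generalizing a b with
  | nil => simp
  | cons x xs ih => simp [ih]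

theorem pvB_eq (nums : List Int) :
    max_range_alt nums =
      ((List.range nums.length).map (pvLeftAt nums),
       (List.range nums.length).map (pvRightAt nums)) := by
  unfold max_range_alt
  simpa using pvFoldl_pair_append (pvLeftAt nums) (pvRightAt nums) (List.range nums.length) [] []

-- characterizations of B's scans
theorem pvLeftAt_none (nums : List Int) (i : Nat)
    (h : ∀ j, j < i → ¬ pvV nums i < pvV nums j) : pvLeftAt nums i = -1 := by
  unfold pvLeftAt
  have : (List.range i).reverse.find? (fun j => decide (pvV nums i < pvV nums j)) = none := by
    rw [List.find?_eq_none]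
    intro x hx
    simp only [List.mem_reverse, List.mem_range] at hx
    simpa using h x hx
  rw [this]

theorem pvLeftAt_eq (nums : List Int) (i j : Nat) (hj : j < i)
    (hP : pvV nums i < pvV nums j)
    (hmax : ∀ t, j < t → t < i → ¬ pvV nums i < pvV nums t) :
    pvLeftAt nums i = (j : Int) := by
  unfold pvLeftAt
  have hsplit : List.range i = List.range (j+1) ++ List.range' (j+1) (i-(j+1)) := by
    rw [List.range_eq_range', List.range_eq_range']
    have := List.range'_append (s := 0) (m := j+1) (n := i-(j+1)) (step := 1)
    simpa [Nat.add_sub_cancel' hj] using this.symm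
    -- 0 + 1*(j+1) = j+1 and (j+1) + (i-(j+1)) = i
  have hfind : (List.range i).reverse.find? (fun t => decide (pvV nums i < pvV nums t)) = some j := by
    rw [hsplit, List.reverse_append, List.find?_append]
    have h1 : (List.range' (j+1) (i-(j+1))).reverse.find?
        (fun t => decide (pvV nums i < pvV nums t)) = none := by
      rw [List.find?_eq_none]
      intro x hx
      simp only [List.mem_reverse, List.mem_range'_1] at hx
      have : x < i := by omega
      simpa using hmax x (by omega) this
    have h2 : (List.range (j+1)).reverse.find?
        (fun t => decide (pvV nums i < pvV nums t)) = some j := by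
      rw [List.range_succ, List.reverse_append]
      simp [List.find?_cons_of_pos, hP]
    rw [h1, h2]
    rfl
  rw [hfind]

theorem pvRightAt_none (nums : List Int) (i : Nat)
    (h : ∀ t, i < t → t < nums.length → ¬ pvV nums i ≤ pvV nums t) :
    pvRightAt nums i = (nums.length : Int) := by
  unfold pvRightAt
  have : (List.range' (i+1) (nums.length - (i+1))).find?
      (fun t => decide (pvV nums i ≤ pvV nums t)) = none := by
    rw [List.find?_eq_none]
    intro x hx
    simp only [List.mem_range'_1] at hx
    simpa using h x (by omega) (by omega)
  rw [this]

theorem pvRightAt_eq (nums : List Int) (i j : Nat) (hij : i < j) (hj : j < nums.length)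
    (hP : pvV nums i ≤ pvV nums j)
    (hmin : ∀ t, i < t → t < j → ¬ pvV nums i ≤ pvV nums t) :
    pvRightAt nums i = (j : Int) := by
  unfold pvRightAt
  have hsplit : List.range' (i+1) (nums.length - (i+1)) =
      List.range' (i+1) (j-(i+1)) ++ List.range' j (nums.length - j) := by
    have := List.range'_append (s := i+1) (m := j-(i+1)) (n := nums.length - j) (step := 1)
    have h1 : i+1 + 1*(j-(i+1)) = j := by omega
    have h2 : (j-(i+1)) + (nums.length - j) = nums.length - (i+1) := by omega
    rw [h1, h2] at this
    exact this.symm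
  have hcons : List.range' j (nums.length - j) = j :: List.range' (j+1) (nums.length - (j+1)) := by
    have : nums.length - j = (nums.length - (j+1)) + 1 := by omega
    rw [this, List.range'_succ]
  have hfind : (List.range' (i+1) (nums.length - (i+1))).find?
      (fun t => decide (pvV nums i ≤ pvV nums t)) = some j := by
    rw [hsplit, List.find?_append]
    have h1 : (List.range' (i+1) (j-(i+1))).find?
        (fun t => decide (pvV nums i ≤ pvV nums t)) = none := by
      rw [List.find?_eq_none]
      intro x hx
      simp only [List.mem_range'_1] at hx
      simpa using hmin x (by omega) (by omega)
    rw [h1, hcons]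
    simp [List.find?_cons_of_pos, hP]
  rw [hfind]

-- loop invariant for A
structure PvInv (nums : List Int) (k : Nat) (st : List Nat) (left right : List Int) : Prop where
  llen : left.length = nums.length
  rlen : right.length = nums.length
  sbound : ∀ j ∈ st, j < k
  schain : List.IsChain (· > ·) st
  smem : ∀ j, j < k → (j ∈ st ↔ ∀ t, j < t → t < k → pvV nums t < pvV nums j)
  lval : ∀ j, j < k → left.getD j 0 = pvLeftAt nums j
  lrest : ∀ j, k ≤ j → j < nums.length → left.getD j 0 = -1
  rval_out : ∀ j, j < nums.length → (∀ t, j < t → t < k → ¬ pvV nums j ≤ pvV nums t) →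
      right.getD j 0 = (nums.length : Int)
  rval_in : ∀ j t, j < nums.length → j < t → t < k → pvV nums j ≤ pvV nums t →
      right.getD j 0 = pvRightAt nums j

theorem pvAPop_fst (nums : List Int) (i : Nat) (st : List Nat) (r : List Int) :
    (pvAPop nums i st r).1 = st.dropWhile (fun t => decide (pvV nums t ≤ pvV nums i)) := by
  induction st generalizing r with
  | nil => simp [pvAPop]
  | cons t rest ih =>
    by_cases h : pvV nums t ≤ pvV nums i
    · simp [pvAPop, h, List.dropWhile_cons, ih]
    · simp [pvAPop, h, List.dropWhile_cons]

theorem pvAPop_len (nums : List Int) (i : Nat) (st : List Nat) (r : List Int) :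
    (pvAPop nums i st r).2.length = r.length := by
  induction st generalizing r with
  | nil => simp [pvAPop]
  | cons t rest ih =>
    by_cases h : pvV nums t ≤ pvV nums i
    · simp [pvAPop, h, ih]
    · simp [pvAPop, h]

theorem pvAPop_getD_not_mem (nums : List Int) (i : Nat) (st : List Nat) (r : List Int) (j : Nat)
    (hj : j ∉ st.takeWhile (fun t => decide (pvV nums t ≤ pvV nums i))) :
    (pvAPop nums i st r).2.getD j 0 = r.getD j 0 := by
  induction st generalizing r with
  | nil => simp [pvAPop]
  | cons t rest ih =>
    by_cases h : pvV nums t ≤ pvV nums i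
    · rw [List.takeWhile_cons_of_pos (by simpa using h)] at hj
      simp only [List.mem_cons, not_or] at hj
      rw [show pvAPop nums i (t :: rest) r = pvAPop nums i rest (r.set t (i : Int)) by
        simp [pvAPop, h]]
      rw [ih _ hj.2]
      simp only [List.getD_eq_getElem?_getD, List.getElem?_set]
      rw [if_neg (fun h => hj.1 h.symm)]
    · simp [pvAPop, h]

theorem pvAPop_getD_mem (nums : List Int) (i : Nat) (st : List Nat) (r : List Int) (j : Nat)
    (hb : ∀ x ∈ st, x < r.length)
    (hj : j ∈ st.takeWhile (fun t => decide (pvV nums t ≤ pvV nums i))) :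
    (pvAPop nums i st r).2.getD j 0 = (i : Int) := by
  induction st generalizing r with
  | nil => simp at hj
  | cons t rest ih =>
    by_cases h : pvV nums t ≤ pvV nums i
    · rw [List.takeWhile_cons_of_pos (by simpa using h)] at hj
      rw [show pvAPop nums i (t :: rest) r = pvAPop nums i rest (r.set t (i : Int)) by
        simp [pvAPop, h]]
      by_cases hjr : j ∈ rest.takeWhile (fun t => decide (pvV nums t ≤ pvV nums i))
      · exact ih _ (fun x hx => by rw [List.length_set]; exact hb x (List.mem_cons_of_mem _ hx)) hjr
      · have hjt : j = t := by
          rcases List.mem_cons.mp hj with h1 | h1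
          · exact h1
          · exact absurd h1 hjr
        rw [pvAPop_getD_not_mem nums i rest _ j hjr]
        subst hjt
        have : j < r.length := hb j (List.mem_cons_self)
        simp [List.getD_eq_getElem?_getD, List.getElem?_set, this]
    · rw [List.takeWhile_cons_of_neg (by simpa using h)] at hj
      simp at hj

theorem pvDropWhile_head_false {α : Type} (p : α → Bool) (l : List α) (t : α) (rest : List α)
    (h : l.dropWhile p = t :: rest) : p t = false := by
  induction l with
  | nil => simp at h
  | cons x xs ih =>
    by_cases hx : p x
    · rw [List.dropWhile_cons_of_pos hx] at h; exact ih h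
    · rw [List.dropWhile_cons_of_neg hx] at h
      cases h; simpa using hx

theorem pvInv_pairwise_gt {nums : List Int} {k : Nat} {st : List Nat} {left right : List Int}
    (I : PvInv nums k st left right) : st.Pairwise (· > ·) :=
  List.isChain_iff_pairwise.mp I.schain

theorem pvInv_vals {nums : List Int} {k : Nat} {st : List Nat} {left right : List Int}
    (I : PvInv nums k st left right) :
    st.Pairwise (fun a b => pvV nums a < pvV nums b) := by
  refine List.Pairwise.imp_of_mem ?_ (pvInv_pairwise_gt I)
  intro a b ha hb hab
  exact ((I.smem b (I.sbound b hb)).mp hb) a hab (I.sbound a ha)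

theorem pvInv_dom {nums : List Int} {k : Nat} {st : List Nat} {left right : List Int}
    (I : PvInv nums k st left right) :
    ∀ t, t < k → ∃ j ∈ st, t ≤ j ∧ pvV nums t ≤ pvV nums j := by
  suffices H : ∀ d t, t < k → k - t ≤ d → ∃ j ∈ st, t ≤ j ∧ pvV nums t ≤ pvV nums j by
    intro t ht; exact H (k - t) t ht le_rfl
  intro d
  induction d with
  | zero => intro t ht hle; omega
  | succ d ih =>
    intro t ht hle
    by_cases hmem : t ∈ st
    · exact ⟨t, hmem, le_rfl, le_rfl⟩
    · have h2 : ¬ ∀ s, t < s → s < k → pvV nums s < pvV nums t :=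
        fun hh => hmem ((I.smem t ht).mpr hh)
      push_neg at h2
      obtain ⟨s, hts, hsk, hvs⟩ := h2
      obtain ⟨j, hj, hsj, hvj⟩ := ih s hsk (by omega)
      exact ⟨j, hj, by omega, le_trans hvs hvj⟩

theorem pvStep_inv {nums : List Int} {k : Nat} (s : List Nat × List Int × List Int)
    (I : PvInv nums k s.1 s.2.1 s.2.2) (hk : k < nums.length) :
    PvInv nums (k+1) (pvAStep nums s k).1
      (pvAStep nums s k).2.1 (pvAStep nums s k).2.2 := by
  obtain ⟨st, left, right⟩ := s
  simp only at I
  have hvals := pvInv_vals I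
  have hgt := pvInv_pairwise_gt I
  have hdom := pvInv_dom I
  have hsplit : st.takeWhile (fun t => decide (pvV nums t ≤ pvV nums k)) ++
      st.dropWhile (fun t => decide (pvV nums t ≤ pvV nums k)) = st :=
    List.takeWhile_append_dropWhile
  have hpopv : ∀ m ∈ st.takeWhile (fun t => decide (pvV nums t ≤ pvV nums k)),
      pvV nums m ≤ pvV nums k := fun m hm => by simpa using List.mem_takeWhile_imp hm
  have hmem_st : ∀ m, m ∈ st ↔
      (m ∈ st.takeWhile (fun t => decide (pvV nums t ≤ pvV nums k)) ∨
       m ∈ st.dropWhile (fun t => decide (pvV nums t ≤ pvV nums k))) := by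
    intro m
    conv_lhs => rw [← hsplit]
    exact List.mem_append
  have hkeptmem : ∀ m ∈ st.dropWhile (fun t => decide (pvV nums t ≤ pvV nums k)), m ∈ st :=
    fun m hm => (List.dropWhile_sublist _).subset hm
  have hkeptgt : ∀ m ∈ st.dropWhile (fun t => decide (pvV nums t ≤ pvV nums k)),
      pvV nums k < pvV nums m := by
    rcases hd : st.dropWhile (fun t => decide (pvV nums t ≤ pvV nums k)) with _ | ⟨t0, r0⟩
    · simp
    · have hpt := pvDropWhile_head_false _ st t0 r0 hd
      have hvt : pvV nums k < pvV nums t0 := by simpa using hpt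
      intro m hm
      rcases List.mem_cons.mp hm with h1 | h1
      · subst h1; exact hvt
      · have hkv : (t0 :: r0).Pairwise (fun a b => pvV nums a < pvV nums b) := by
          rw [← hd]; exact List.Pairwise.sublist (List.dropWhile_sublist _) hvals
        exact hvt.trans ((List.pairwise_cons.mp hkv).1 m h1)
  have hbound_r : ∀ x ∈ st, x < right.length := by
    intro x hx
    have := I.sbound x hx
    rw [I.rlen]; omega
  have hrlen := pvAPop_len nums k st right
  have hr_pop : ∀ j ∈ st.takeWhile (fun t => decide (pvV nums t ≤ pvV nums k)),
      (pvAPop nums k st right).2.getD j 0 = (k : Int) :=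
    fun j hj => pvAPop_getD_mem nums k st right j hbound_r hj
  have hr_keep : ∀ (j : Nat), j ∉ st.takeWhile (fun t => decide (pvV nums t ≤ pvV nums k)) →
      (pvAPop nums k st right).2.getD j 0 = right.getD j 0 :=
    fun j hj => pvAPop_getD_not_mem nums k st right j hj
  have hstep : pvAStep nums (st, left, right) k
      = (k :: st.dropWhile (fun t => decide (pvV nums t ≤ pvV nums k)),
         (match st.dropWhile (fun t => decide (pvV nums t ≤ pvV nums k)) with
          | [] => left
          | t :: _ => left.set k (t : Int)),
         (pvAPop nums k st right).2) := by
    simp only [pvAStep, pvAPop_fst]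
  rw [hstep]
  constructor
  -- llen
  · rcases hd : st.dropWhile (fun t => decide (pvV nums t ≤ pvV nums k)) with _ | ⟨t0, r0⟩ <;>
      simp only [hd]
    · exact I.llen
    · rw [List.length_set]; exact I.llen
  -- rlen
  · exact hrlen.trans I.rlen
  -- sbound
  · intro j hj
    rcases List.mem_cons.mp hj with rfl | h1
    · omega
    · have := I.sbound j (hkeptmem j h1); omega
  -- schain
  · rw [List.isChain_iff_pairwise]
    refine List.pairwise_cons.mpr ⟨?_, ?_⟩
    · exact fun m hm => I.sbound m (hkeptmem m hm)
    · exact List.Pairwise.sublist (List.dropWhile_sublist _) hgt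
  -- smem
  · intro j hj
    constructor
    · intro hjm t ht1 ht2
      rcases List.mem_cons.mp hjm with rfl | hjk
      · omega
      · by_cases htk : t < k
        · exact ((I.smem j (I.sbound j (hkeptmem j hjk))).mp (hkeptmem j hjk)) t ht1 htk
        · have : t = k := by omega
          subst this
          exact hkeptgt j hjk
    · intro hall
      by_cases hjk : j = k
      · subst hjk; exact List.mem_cons_self
      · have hjk' : j < k := by omega
        have hjst : j ∈ st := (I.smem j hjk').mpr (fun t h1 h2 => hall t h1 (by omega))
        rcases (hmem_st j).mp hjst with hp | hke
        · exact absurd (hpopv j hp) (not_le.mpr (hall k hjk' (by omega)))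
        · exact List.mem_cons_of_mem _ hke
  -- lval
  · intro j hj
    by_cases hjk : j < k
    · rcases hd : st.dropWhile (fun t => decide (pvV nums t ≤ pvV nums k)) with _ | ⟨t0, r0⟩ <;>
        simp only [hd]
      · exact I.lval j hjk
      · have := I.lval j hjk
        rw [List.getD_eq_getElem?_getD] at this ⊢
        rw [List.getElem?_set, if_neg (show ¬ (k = j) by omega)]
        exact this
    · have hjk2 : j = k := by omega
      subst hjk2
      rcases hd : st.dropWhile (fun t => decide (pvV nums t ≤ pvV nums j)) with _ | ⟨t0, r0⟩ <;>
        simp only [hd]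
      · rw [I.lrest j le_rfl hk]
        refine (pvLeftAt_none nums j ?_).symm
        intro m hm hvm
        obtain ⟨w, hw, hmw, hvw⟩ := hdom m hm
        rcases (hmem_st w).mp hw with hp | hke
        · exact absurd (hpopv w hp) (not_le.mpr (lt_of_lt_of_le hvm hvw))
        · rw [hd] at hke; simp at hke
      · have hkl : j < left.length := by rw [I.llen]; exact hk
        have hL : (left.set j (t0 : Int)).getD j 0 = (t0 : Int) := by
          rw [List.getD_eq_getElem?_getD, List.getElem?_set, if_pos rfl, if_pos hkl]
          rfl
        rw [hL]
        have ht0k : t0 ∈ st.dropWhile (fun t => decide (pvV nums t ≤ pvV nums j)) := by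
          rw [hd]; exact List.mem_cons_self
        have ht0st : t0 ∈ st := hkeptmem t0 ht0k
        refine (pvLeftAt_eq nums j t0 (I.sbound t0 ht0st) (hkeptgt t0 ht0k) ?_).symm
        intro m h1 h2 hv
        obtain ⟨w, hw, hmw, hvw⟩ := hdom m h2
        rcases (hmem_st w).mp hw with hp | hke
        · exact absurd (hpopv w hp) (not_le.mpr (hv.trans_le hvw))
        · rw [hd] at hke
          have hker : (t0 :: r0).Pairwise (· > ·) := by
            rw [← hd]; exact List.Pairwise.sublist (List.dropWhile_sublist _) hgt
          have hwle : w ≤ t0 := by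
            rcases List.mem_cons.mp hke with rfl | hr
            · exact le_rfl
            · exact le_of_lt ((List.pairwise_cons.mp hker).1 w hr)
          omega
  -- lrest
  · intro j hj1 hj2
    rcases hd : st.dropWhile (fun t => decide (pvV nums t ≤ pvV nums k)) with _ | ⟨t0, r0⟩ <;>
      simp only [hd]
    · exact I.lrest j (by omega) hj2
    · rw [List.getD_eq_getElem?_getD, List.getElem?_set, if_neg (show ¬ (k = j) by omega)]
      rw [← List.getD_eq_getElem?_getD]
      exact I.lrest j (by omega) hj2
  -- rval_out
  · intro j hjn hno
    have hjp : j ∉ st.takeWhile (fun t => decide (pvV nums t ≤ pvV nums k)) := by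
      intro hp
      have hjst : j ∈ st := (hmem_st j).mpr (Or.inl hp)
      exact hno k (I.sbound j hjst) (by omega) (hpopv j hp)
    rw [hr_keep j hjp]
    exact I.rval_out j hjn (fun t h1 h2 => hno t h1 (by omega))
  -- rval_in
  · intro j t hjn hjt htk hv
    by_cases hjp : j ∈ st.takeWhile (fun t => decide (pvV nums t ≤ pvV nums k))
    · rw [hr_pop j hjp]
      have hjst : j ∈ st := (hmem_st j).mpr (Or.inl hjp)
      have hjk := I.sbound j hjst
      refine (pvRightAt_eq nums j k hjk hk (hpopv j hjp) ?_).symm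
      intro m h1 h2 hvm
      exact absurd hvm (not_le.mpr (((I.smem j hjk).mp hjst) m h1 h2))
    · rw [hr_keep j hjp]
      by_cases hex : ∃ m, j < m ∧ m < k ∧ pvV nums j ≤ pvV nums m
      · obtain ⟨m, h1, h2, h3⟩ := hex
        exact I.rval_in j m hjn h1 h2 h3
      · exfalso
        push_neg at hex
        have ht_eq : t = k := by
          by_contra hne
          exact absurd hv (not_le.mpr (hex t hjt (by omega)))
        subst ht_eq
        have hjst : j ∈ st := (I.smem j hjt).mpr (fun m h1 h2 => hex m h1 h2)
        rcases (hmem_st j).mp hjst with hp | hke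
        · exact hjp hp
        · exact absurd hv (not_le.mpr (hkeptgt j hke))

theorem pvFold_inv (nums : List Int) (k : Nat) (hk : k ≤ nums.length) :
    PvInv nums k
      ((List.range k).foldl (pvAStep nums)
        ([], List.replicate nums.length (-1), List.replicate nums.length (nums.length : Int))).1
      ((List.range k).foldl (pvAStep nums)
        ([], List.replicate nums.length (-1), List.replicate nums.length (nums.length : Int))).2.1
      ((List.range k).foldl (pvAStep nums)
        ([], List.replicate nums.length (-1), List.replicate nums.length (nums.length : Int))).2.2 := by
  induction k with
  | zero =>
    constructor
    · simp
    · simp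
    · intro j hj; simp at hj
    · simp
    · intro j hj; omega
    · intro j hj; omega
    · intro j _ hjn; exact List.getD_replicate _ hjn
    · intro j hj _; exact List.getD_replicate _ hj
    · intro j t hj ht1 ht2; omega
  | succ k ih =>
    have hk' : k < nums.length := by omega
    rw [List.range_succ, List.foldl_append]
    exact pvStep_inv _ (ih (by omega)) hk'

-- ===== VERDICT (by name: the statement is the Claim_ definition above) =====
theorem max_range_spec : Claim_equal_max_range := by
  intro nums _
  unfold Spec_max_range
  have I := pvFold_inv nums nums.length le_rfl
  rw [pvB_eq]
  simp only [max_range]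
  refine Prod.ext ?_ ?_
  · apply List.ext_getElem
    · rw [I.llen]; simp
    · intro i h1 h2
      have hi : i < nums.length := by rw [I.llen] at h1; exact h1
      have hv := I.lval i hi
      rw [List.getD_eq_getElem?_getD, List.getElem?_eq_getElem h1] at hv
      simp only [Option.getD_some] at hv
      rw [hv]
      simp
  · apply List.ext_getElem
    · rw [I.rlen]; simp
    · intro i h1 h2
      have hi : i < nums.length := by rw [I.rlen] at h1; exact h1
      by_cases hex : ∃ t, i < t ∧ t < nums.length ∧ pvV nums i ≤ pvV nums t
      · obtain ⟨t, ha, hb, hc⟩ := hex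
        have hv := I.rval_in i t hi ha hb hc
        rw [List.getD_eq_getElem?_getD, List.getElem?_eq_getElem h1] at hv
        simp only [Option.getD_some] at hv
        rw [hv]
        simp
      · push_neg at hex
        have hv := I.rval_out i hi (fun t ht1 ht2 => not_le.mpr (hex t ht1 ht2))
        rw [List.getD_eq_getElem?_getD, List.getElem?_eq_getElem h1] at hv
        simp only [Option.getD_some] at hv
        rw [hv]
        have : pvRightAt nums i = (nums.length : Int) :=
          pvRightAt_none nums i (fun t ht1 ht2 => not_le.mpr (hex t ht1 ht2))
        simp [this]
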